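-- pv_equiv track=rewrite | github.com/rmassaroni/platformbasedcomputing | hw2/hw2.py | friend_list
-- ===== SOURCE A (Python) =====
-- def friend_list(friend_dictionary):
--     """
--     Write a method named friendList that accepts a dictionary as a parameter and reads
--     friend relationships and stores them into a new dictionary that is returned.
--     You should create a new dictionary where each key is a person's name from the original
--     simple dictionary, and the value associated with that key is a list of all friends of
--     that person. Friendships are bi-directional:
--     if Marty is friends with Danielle, Danielle is friends with Marty.
--
--     The dictionary parameter contains one friend relationship per key/value pair,
--     consisting of two names. If the dictionary parameter,friendMap looks like this:
--     Marty: Cynthia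
--     Danielle: Marty
--     Then the call of friendList(friendMap) should return a dictionary with the following
--     contents:
--     {Cynthia:[Marty], Danielle:[Marty], Marty:[Cynthia, Danielle]}
--     """
--     d = dict()
--     for k in friend_dictionary.keys():
--         v = friend_dictionary.get(k)
--         if k in d.keys():
--             if v not in d.get(k):
--                 #
--                 d[k].append(v)
--                 #d.update({k:d.get(k).append(v)})
--         if k not in d.keys():
--             #
--             list = [v]
--             d[k] = list
--             #d(k).append(v)
--             #d.update({k:{}})
--             #d.update({k:d.get(k).append(v)})
--         if v not in d.keys():
--             #
--             #d.update({v:{}})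
--             #d.update({v:d.get(v).append(k)})
--             list = [k]
--             d[v] = list
--             #d(v).append(k)
--         if v in d.keys():
--             if k not in d.get(v):
--                 #
--                 #d.update({v:d.get(v).append(k)})
--                 #d[v] = d[v].append(k)
--                 d[v].append(k)
--     return d
-- ===== SOURCE B (Python) =====
-- def friend_list(friend_dictionary):
--     pairs = list(friend_dictionary.items())
--     persons = list(dict.fromkeys(x for kv in pairs for x in kv))
--     result = {}
--     for p in persons:
--         friends = []
--         for k, v in pairs:
--             if k == p and v not in friends:
--                 friends.append(v)
--             if v == p and k not in friends:
--                 friends.append(k)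
--         result[p] = friends
--     return result
-- ===== Notes on version B (the rewrite author's own statement) =====
-- stated objective: alternative
-- what changed: Replaces A's four-branch in-place dict mutation per pair with a two-phase decomposition: first collect the distinct persons with an ordered dedup over keys and values, then build each person's friend list by one guarded scan of the pairs.
import Mathlib
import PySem

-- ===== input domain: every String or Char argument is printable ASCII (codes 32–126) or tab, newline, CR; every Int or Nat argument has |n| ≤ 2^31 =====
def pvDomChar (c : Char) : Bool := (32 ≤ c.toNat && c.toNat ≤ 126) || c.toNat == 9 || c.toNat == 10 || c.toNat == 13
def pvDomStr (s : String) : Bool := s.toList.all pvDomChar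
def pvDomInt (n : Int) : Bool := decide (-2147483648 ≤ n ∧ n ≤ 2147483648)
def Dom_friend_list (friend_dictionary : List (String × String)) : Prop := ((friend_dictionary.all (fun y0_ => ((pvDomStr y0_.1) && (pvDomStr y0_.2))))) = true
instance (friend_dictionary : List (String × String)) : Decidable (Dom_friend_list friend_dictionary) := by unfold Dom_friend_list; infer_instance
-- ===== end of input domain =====

-- B replaces A's four-branch in-place dict mutation per pair by a two-phase build (ordered
-- dedup of the persons, then one guarded scan of the pairs per person); alternative decomposition, not faster.

-- ===== PORT A =====
-- the body of A's loop over the input dict's items: the four sequential if-branches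
def friendStepA (d : PySem.Dict String (List String)) (kv : String × String) : PySem.Dict String (List String) :=
  let k := kv.1
  let v := kv.2
  let d1 := if d.contains k then (if (d.getD k []).contains v then d else d.modify k [] (· ++ [v])) else d
  let d2 := if d1.contains k then d1 else d1.insert k [v]
  let d3 := if d2.contains v then d2 else d2.insert v [k]
  if d3.contains v then (if (d3.getD v []).contains k then d3 else d3.modify v [] (· ++ [k])) else d3

def friend_list (friend_dictionary : List (String × String)) : List (String × List String) :=
  (friend_dictionary.foldl friendStepA PySem.Dict.empty).items

-- ===== PORT B =====
-- the body of B's inner loop: append p's partner from the pair, guarded by a membership check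
def friendStepB (p : String) (fs : List String) (kv : String × String) : List String :=
  let fs1 := if kv.1 == p && !(fs.contains kv.2) then fs ++ [kv.2] else fs
  if kv.2 == p && !(fs1.contains kv.1) then fs1 ++ [kv.1] else fs1

def friendsOf (friend_dictionary : List (String × String)) (p : String) : List String :=
  friend_dictionary.foldl (friendStepB p) []

def friend_list_alt (friend_dictionary : List (String × String)) : List (String × List String) :=
  (PySem.List.dedup (friend_dictionary.flatMap (fun kv => [kv.1, kv.2]))).map
    (fun p => (p, friendsOf friend_dictionary p))

-- ===== PRECONDITION & SPEC =====
def Spec_friend_list (friend_dictionary : List (String × String)) (out : List (String × List String)) : Prop := out = friend_list_alt friend_dictionary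
instance (friend_dictionary : List (String × String)) (out : List (String × List String)) : Decidable (Spec_friend_list friend_dictionary out) := by unfold Spec_friend_list; infer_instance

-- ===== CLAIM (what is proved, stated in full; the proofs are below) =====
def Claim_equal_friend_list : Prop := ∀ (friend_dictionary : List (String × String)), Dom_friend_list friend_dictionary → Spec_friend_list friend_dictionary (friend_list friend_dictionary)

-- ===== LEMMAS AND PROOFS =====

-- an A-step is its first two branches (append v to d[k] / create d[k]) followed by its
-- last two (create d[v] / append k to d[v]); the two halves check and act in opposite order
def halfA (d : PySem.Dict String (List String)) (a b : String) : PySem.Dict String (List String) :=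
  let d1 := if d.contains a then (if (d.getD a []).contains b then d else d.modify a [] (· ++ [b])) else d
  if d1.contains a then d1 else d1.insert a [b]

def halfB (d : PySem.Dict String (List String)) (a b : String) : PySem.Dict String (List String) :=
  let d3 := if d.contains a then d else d.insert a [b]
  if d3.contains a then (if (d3.getD a []).contains b then d3 else d3.modify a [] (· ++ [b])) else d3

theorem friendStepA_eq (d : PySem.Dict String (List String)) (kv : String × String) :
    friendStepA d kv = halfB (halfA d kv.1 kv.2) kv.2 kv.1 := rfl

theorem getD_halfA (d : PySem.Dict String (List String)) (a b p : String) :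
    (halfA d a b).getD p [] =
      if p = a then (if (d.getD a []).contains b then d.getD a [] else d.getD a [] ++ [b])
      else d.getD p [] := by
  unfold halfA
  by_cases h : d.contains a = true
  · by_cases hm : b ∈ d.getD a [] <;>
      by_cases hp : p = a <;>
      simp [h, hm, hp, PySem.Dict.getD_modify, PySem.Dict.contains_modify]
  · simp only [Bool.not_eq_true] at h
    have h0 : d.getD a [] = [] := PySem.Dict.getD_of_not_contains d [] h
    by_cases hp : p = a <;> simp [h, hp, h0, PySem.Dict.getD_insert]

theorem getD_halfB (d : PySem.Dict String (List String)) (a b p : String) :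
    (halfB d a b).getD p [] =
      if p = a then (if (d.getD a []).contains b then d.getD a [] else d.getD a [] ++ [b])
      else d.getD p [] := by
  unfold halfB
  by_cases h : d.contains a = true
  · by_cases hm : b ∈ d.getD a [] <;>
      by_cases hp : p = a <;>
      simp [h, hm, hp, PySem.Dict.getD_modify, PySem.Dict.contains_modify]
  · simp only [Bool.not_eq_true] at h
    have h0 : d.getD a [] = [] := PySem.Dict.getD_of_not_contains d [] h
    by_cases hp : p = a <;>
      simp [h, hp, h0, PySem.Dict.contains_insert, PySem.Dict.getD_insert,
        PySem.Dict.getD_modify, PySem.Dict.contains_modify]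

-- one A-step changes each stored list exactly like one B-step
theorem getD_friendStepA (d : PySem.Dict String (List String)) (kv : String × String) (p : String) :
    (friendStepA d kv).getD p [] = friendStepB p (d.getD p []) kv := by
  obtain ⟨k, v⟩ := kv
  rw [friendStepA_eq, getD_halfB]
  simp only [getD_halfA, friendStepB]
  by_cases hk : p = k <;> by_cases hv : p = v
  · subst hk; subst hv
    by_cases hm : p ∈ d.getD p [] <;> simp [hm]
  · subst hk
    by_cases hm : v ∈ d.getD p [] <;> simp [hm, hv, Ne.symm hv]
  · subst hv
    by_cases hm : k ∈ d.getD p [] <;> simp [hm, hk, Ne.symm hk] <;> split_ifs <;> simp_all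
  · simp [hk, hv, Ne.symm hk, Ne.symm hv]

theorem keys_halfA (d : PySem.Dict String (List String)) (a b : String) :
    (halfA d a b).keys = PySem.Set.add d.keys a := by
  unfold halfA
  rw [PySem.Set.add_eq_ite]
  by_cases h : d.contains a = true
  · have ha : a ∈ d.keys := (PySem.Dict.contains_iff_mem_keys d a).mp h
    by_cases hm : b ∈ d.getD a [] <;>
      simp [h, hm, ha, PySem.Dict.keys_modify, PySem.Dict.contains_modify,
        PySem.Dict.keys_insert_of_contains]
  · simp only [Bool.not_eq_true] at h
    have ha : a ∉ d.keys := fun hx => by simp [(PySem.Dict.contains_iff_mem_keys d a).mpr hx] at h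
    simp [h, ha, PySem.Dict.keys_insert_of_not_contains]

theorem keys_halfB (d : PySem.Dict String (List String)) (a b : String) :
    (halfB d a b).keys = PySem.Set.add d.keys a := by
  unfold halfB
  rw [PySem.Set.add_eq_ite]
  by_cases h : d.contains a = true
  · have ha : a ∈ d.keys := (PySem.Dict.contains_iff_mem_keys d a).mp h
    by_cases hm : b ∈ d.getD a [] <;>
      simp [h, hm, ha, PySem.Dict.keys_modify, PySem.Dict.contains_modify,
        PySem.Dict.keys_insert_of_contains]
  · simp only [Bool.not_eq_true] at h
    have ha : a ∉ d.keys := fun hx => by simp [(PySem.Dict.contains_iff_mem_keys d a).mpr hx] at h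
    simp [h, ha, PySem.Dict.keys_insert_of_not_contains, PySem.Dict.contains_insert,
      PySem.Dict.keys_modify, PySem.Dict.contains_modify, PySem.Dict.getD_insert,
      PySem.Dict.keys_insert_of_contains]

-- one A-step changes the key list exactly like two Set.add's
theorem keys_friendStepA (d : PySem.Dict String (List String)) (kv : String × String) :
    (friendStepA d kv).keys = PySem.Set.add (PySem.Set.add d.keys kv.1) kv.2 := by
  rw [friendStepA_eq, keys_halfB, keys_halfA]

theorem keys_foldl_friendStepA (fd : List (String × String)) (d : PySem.Dict String (List String)) :
    (fd.foldl friendStepA d).keys = fd.foldl (fun ks kv => PySem.Set.add (PySem.Set.add ks kv.1) kv.2) d.keys := by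
  induction fd generalizing d with
  | nil => rfl
  | cons kv fd ih => simp [List.foldl_cons, ih, keys_friendStepA]

theorem getD_foldl_friendStepA (fd : List (String × String)) (d : PySem.Dict String (List String)) (p : String) :
    (fd.foldl friendStepA d).getD p [] = fd.foldl (friendStepB p) (d.getD p []) := by
  induction fd generalizing d with
  | nil => rfl
  | cons kv fd ih => simp [List.foldl_cons, ih, getD_friendStepA]

theorem nodup_keys_foldl_friendStepA (fd : List (String × String)) (d : PySem.Dict String (List String))
    (h : d.keys.Nodup) : (fd.foldl friendStepA d).keys.Nodup := by
  induction fd generalizing d with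
  | nil => exact h
  | cons kv fd ih =>
      simp only [List.foldl_cons]
      exact ih _ (by rw [keys_friendStepA]; exact PySem.Set.nodup_add _ _ (PySem.Set.nodup_add _ _ h))

theorem persons_foldl (fd : List (String × String)) (s : PySem.Set String) :
    fd.foldl (fun ks kv => PySem.Set.add (PySem.Set.add ks kv.1) kv.2) s
      = PySem.Set.update s (fd.flatMap (fun kv => [kv.1, kv.2])) := by
  induction fd generalizing s with
  | nil => simp [PySem.Set.update_nil]
  | cons kv fd ih =>
      simp only [List.foldl_cons, List.flatMap_cons, ih, PySem.Set.update_append,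
        PySem.Set.update_cons, PySem.Set.update_nil]

-- A's key-creation order over the whole input is B's ordered dedup of keys and values
theorem persons_eq (fd : List (String × String)) :
    fd.foldl (fun ks kv => PySem.Set.add (PySem.Set.add ks kv.1) kv.2) ([] : List String)
      = PySem.List.dedup (fd.flatMap (fun kv => [kv.1, kv.2])) := by
  rw [persons_foldl, PySem.Set.update_nil_left, PySem.List.dedup_eq_ofList]

-- ===== VERDICT (by name: the statement is the Claim_ definition above) =====
theorem friend_list_spec : Claim_equal_friend_list := by
  intro fd _
  unfold Spec_friend_list friend_list friend_list_alt
  rw [PySem.Dict.items_eq_map_keys _ (nodup_keys_foldl_friendStepA fd _ (by simp [PySem.Dict.keys_empty])) []]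
  rw [keys_foldl_friendStepA]
  rw [PySem.Dict.keys_empty, persons_eq]
  refine List.map_congr_left (fun p _ => ?_)
  rw [getD_foldl_friendStepA, PySem.Dict.getD_empty]
  rfl
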